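-- pv_equiv track=rewrite | github.com/jiewwantan/RNN_LSTM_trading_model | rnn_backtesting.py | longestconsecutive_loss
-- ===== SOURCE A (Python) =====
-- def longestconsecutive_loss(arr):
--     """
--     This function computes the longest losing streak
--     """
--
--     # remove all non trading activities
--     arr = list(filter(lambda a: a != 0, arr))
--
--     n = len(arr)
--     # Initialize result
--     res = 0
--
--     # Traverse array
--     for i in range(n):
--
--         # Count of current
--         # non-negative integers
--         curr_count = 0
--         while (i < n and arr[i] < 0):
--             curr_count += 1
--             i += 1
--
--         # Update result if required.
--         res = max(res, curr_count)
--
--     return res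
-- ===== SOURCE B (Python) =====
-- def longestconsecutive_loss(arr):
--     """Longest losing streak: single pass, zeros skipped, positives reset the run."""
--     res = 0
--     cur = 0
--     for a in arr:
--         if a > 0:
--             cur = 0
--         elif a < 0:
--             cur += 1
--             if cur > res:
--                 res = cur
--     return res
-- ===== Notes on version B (the rewrite author's own statement) =====
-- stated objective: faster
-- what changed: Replaces the filter pass plus the quadratic restart-a-counter-at-every-index scan by one linear pass that keeps the current and best negative run, skipping zeros in place.
import Mathlib
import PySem

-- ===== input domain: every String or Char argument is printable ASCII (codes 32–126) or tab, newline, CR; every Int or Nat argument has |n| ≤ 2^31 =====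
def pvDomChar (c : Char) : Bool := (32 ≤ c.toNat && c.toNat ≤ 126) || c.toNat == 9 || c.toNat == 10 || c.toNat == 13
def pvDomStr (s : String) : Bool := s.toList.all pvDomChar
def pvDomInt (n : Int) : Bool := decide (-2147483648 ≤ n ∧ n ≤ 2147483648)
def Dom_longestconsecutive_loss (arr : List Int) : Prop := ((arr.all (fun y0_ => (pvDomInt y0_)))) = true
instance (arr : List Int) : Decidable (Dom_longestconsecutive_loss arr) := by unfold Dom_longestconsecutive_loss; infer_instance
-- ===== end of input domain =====

-- B replaces A's quadratic restart-at-every-index scan (after a filter pass) by one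
-- linear pass tracking the current and best negative run (objective: faster, asymptotic).

-- ===== PORT A =====
-- the inner `while (i < n and arr[i] < 0): curr_count += 1; i += 1`
def lccWhile (arr : List Int) (n i curr : Int) : Int :=
  if h : i < n then
    match PySem.List.pyGet? arr i with
    | some v => if v < 0 then lccWhile arr n (i + 1) (curr + 1) else curr
    | none => curr  -- unreachable when n = len(arr): then arr[i] exists for 0 ≤ i < n
  else curr
termination_by (n - i).toNat
decreasing_by omega

def longestconsecutive_loss (arr : List Int) : Int :=
  let arr := arr.filter (fun a => a != 0)
  let n : Int := arr.length
  (PySem.List.pyRange 0 n 1).foldl (fun res i => max res (lccWhile arr n i 0)) 0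

-- ===== PORT B =====
def longestconsecutive_loss_alt (arr : List Int) : Int :=
  (arr.foldl (fun (st : Int × Int) a =>
      if a > 0 then (st.1, 0)
      else if a < 0 then
        let cur := st.2 + 1
        (if cur > st.1 then cur else st.1, cur)
      else st) (0, 0)).1

-- ===== PRECONDITION & SPEC =====
def Spec_longestconsecutive_loss (arr : List Int) (out : Int) : Prop := out = longestconsecutive_loss_alt arr
instance (arr : List Int) (out : Int) : Decidable (Spec_longestconsecutive_loss arr out) := by unfold Spec_longestconsecutive_loss; infer_instance

-- ===== CLAIM (what is proved, stated in full; the proofs are below) =====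
def Claim_equal_longestconsecutive_loss : Prop := ∀ (arr : List Int), Dom_longestconsecutive_loss arr → Spec_longestconsecutive_loss arr (longestconsecutive_loss arr)

-- ===== LEMMAS AND PROOFS =====

-- length of the negative prefix
def negPre : List Int → Int
  | [] => 0
  | x :: xs => if x < 0 then negPre xs + 1 else 0

-- longest negative run (max of negPre over all suffixes)
def maxRun : List Int → Int
  | [] => 0
  | x :: xs => max (negPre (x :: xs)) (maxRun xs)

-- best run reachable on l when the current run already has length c (B's scan, zeros skipped)
def bestFrom (c : Int) : List Int → Int
  | [] => 0
  | x :: xs => if x > 0 then bestFrom 0 xs else if x < 0 then max (c + 1) (bestFrom (c + 1) xs) else bestFrom c xs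

-- extra value B's first (possibly c-extended) run can contribute beyond maxRun
def extraRun (c : Int) : List Int → Int
  | [] => 0
  | x :: xs => if x < 0 then c + negPre (x :: xs) else 0

theorem negPre_nonneg (l : List Int) : 0 ≤ negPre l := by
  induction l with
  | nil => simp [negPre]
  | cons x xs ih => simp only [negPre]; split <;> omega

theorem maxRun_nonneg (l : List Int) : 0 ≤ maxRun l := by
  induction l with
  | nil => simp [maxRun]
  | cons x xs ih => simp only [maxRun]; omega

theorem negPre_cons (x : Int) (xs : List Int) : negPre (x :: xs) = if x < 0 then negPre xs + 1 else 0 := rfl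
theorem maxRun_cons (x : Int) (xs : List Int) : maxRun (x :: xs) = max (negPre (x :: xs)) (maxRun xs) := rfl
theorem extraRun_cons (c x : Int) (xs : List Int) : extraRun c (x :: xs) = if x < 0 then c + negPre (x :: xs) else 0 := rfl

theorem extraRun_le_maxRun (l : List Int) : extraRun 0 l ≤ maxRun l := by
  cases l with
  | nil => simp [extraRun, maxRun]
  | cons x xs =>
    simp only [extraRun, maxRun]
    split <;> [skip; exact le_max_of_le_left (negPre_nonneg _)]
    omega

theorem lccWhile_eq (k : Nat) (l : List Int) (i c : Int) (hi : 0 ≤ i)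
    (hk : l.length - i.toNat ≤ k) :
    lccWhile l (l.length : Int) i c = c + negPre (l.drop i.toNat) := by
  induction k generalizing i c with
  | zero =>
    have hge : l.length ≤ i.toNat := by omega
    rw [lccWhile]
    rw [List.drop_eq_nil_of_le hge]
    rw [dif_neg (by omega)]
    simp [negPre]
  | succ k ih =>
    by_cases h : i < (l.length : Int)
    · have hlt : i.toNat < l.length := by omega
      rw [lccWhile, dif_pos h]
      have hg : PySem.List.pyGet? l i = some l[i.toNat] := by
        rw [PySem.List.pyGet?_of_nonneg l hi]
        exact List.getElem?_eq_getElem hlt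
      rw [hg]
      rw [List.drop_eq_getElem_cons hlt]
      simp only [negPre]
      by_cases hv : l[i.toNat] < 0
      · rw [if_pos hv, if_pos hv]
        rw [ih (i + 1) (c + 1) (by omega) (by omega)]
        have : (i + 1).toNat = i.toNat + 1 := by omega
        rw [this]
        omega
      · rw [if_neg hv, if_neg hv]; omega
    · rw [lccWhile, dif_neg h]
      rw [List.drop_eq_nil_of_le (by omega)]
      simp [negPre]

theorem rangeFold_eq (l : List Int) (r : Int) (hr : 0 ≤ r) :
    (List.range l.length).foldl (fun res k => max res (negPre (l.drop k))) r = max r (maxRun l) := by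
  induction l generalizing r with
  | nil => simp [maxRun]; omega
  | cons x xs ih =>
    have : (x :: xs).length = xs.length + 1 := rfl
    rw [this, List.range_succ_eq_map, List.foldl_cons, List.foldl_map]
    simp only [List.drop_zero, List.drop_succ_cons]
    rw [ih (max r (negPre (x :: xs))) (le_max_of_le_left hr)]
    simp only [maxRun]
    omega

-- A computes maxRun of the zero-filtered list
theorem portA_eq (arr : List Int) :
    longestconsecutive_loss arr = maxRun (arr.filter (fun a => a != 0)) := by
  unfold longestconsecutive_loss
  set l := arr.filter (fun a => a != 0) with hl
  simp only []
  rw [PySem.List.pyRange_one]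
  simp only [zero_add, sub_zero, Int.toNat_natCast, List.foldl_map]
  have hcong : ∀ (r : Int) (k : Nat), k ∈ List.range l.length →
      max r (lccWhile l (l.length : Int) (k : Int) 0) = max r (negPre (l.drop k)) := by
    intro r k _
    rw [lccWhile_eq l.length l (k : Int) 0 (by positivity) (by omega)]
    simp
  rw [PySem.List.foldl_congr_mem (List.range l.length) _ _ 0 hcong, rangeFold_eq l 0 le_rfl]
  have := maxRun_nonneg l
  omega

-- B's fold invariant: first component = max of the carried best and the best reachable run
theorem portB_fold (l : List Int) (r c : Int) (hr : 0 ≤ r) :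
    (l.foldl (fun (st : Int × Int) a =>
      if a > 0 then (st.1, 0)
      else if a < 0 then (if st.2 + 1 > st.1 then st.2 + 1 else st.1, st.2 + 1)
      else st) (r, c)).1 = max r (bestFrom c l) := by
  induction l generalizing r c with
  | nil => simp [bestFrom]; omega
  | cons x xs ih =>
    simp only [List.foldl_cons, bestFrom]
    by_cases h1 : x > 0
    · rw [if_pos h1, if_pos h1, ih r 0 hr]
    · rw [if_neg h1, if_neg h1]
      by_cases h2 : x < 0
      · rw [if_pos h2, if_pos h2]
        have : (if c + 1 > r then c + 1 else r) = max r (c + 1) := by omega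
        rw [this, ih _ _ (le_max_of_le_left hr)]
        omega
      · rw [if_neg h2, if_neg h2, ih r c hr]

-- bestFrom on the raw list = maxRun of the filtered list, plus the possible c-extension of the first run
theorem bestFrom_eq (l : List Int) (c : Int) (hc : 0 ≤ c) :
    bestFrom c l = max (maxRun (l.filter (fun a => a != 0))) (extraRun c (l.filter (fun a => a != 0))) := by
  induction l generalizing c with
  | nil => simp [bestFrom, maxRun, extraRun]
  | cons x xs ih =>
    by_cases h0 : x = 0
    · subst h0
      simpa [bestFrom] using ih c hc
    · have hf : (x :: xs).filter (fun a => a != 0) = x :: xs.filter (fun a => a != 0) := by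
        simp [h0]
      rw [hf]
      show (if x > 0 then bestFrom 0 xs else if x < 0 then max (c + 1) (bestFrom (c + 1) xs) else bestFrom c xs) = _
      by_cases h1 : x > 0
      · rw [if_pos h1, ih 0 le_rfl]
        have h2 : ¬ x < 0 := by omega
        have ha := extraRun_le_maxRun (xs.filter (fun a => a != 0))
        have hb := maxRun_nonneg (xs.filter (fun a => a != 0))
        rw [maxRun_cons, extraRun_cons, negPre_cons, if_neg h2, if_neg h2]
        omega
      · have h2 : x < 0 := by omega
        rw [if_neg h1, if_pos h2, ih (c + 1) (by omega)]
        simp only [maxRun_cons, extraRun_cons, negPre_cons, if_pos h2]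
        cases hx : xs.filter (fun a => a != 0) with
        | nil => simp [maxRun, extraRun, negPre]; omega
        | cons y ys =>
          simp only [maxRun_cons, extraRun_cons, negPre_cons]
          have hp := negPre_nonneg ys
          have hm := maxRun_nonneg ys
          split_ifs <;> omega

-- B also computes maxRun of the zero-filtered list
theorem portB_eq (arr : List Int) :
    longestconsecutive_loss_alt arr = maxRun (arr.filter (fun a => a != 0)) := by
  unfold longestconsecutive_loss_alt
  rw [portB_fold arr 0 0 le_rfl, bestFrom_eq arr 0 le_rfl]
  have h1 := extraRun_le_maxRun (arr.filter (fun a => a != 0))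
  have h2 := maxRun_nonneg (arr.filter (fun a => a != 0))
  omega

-- ===== VERDICT (by name: the statement is the Claim_ definition above) =====
theorem longestconsecutive_loss_spec : Claim_equal_longestconsecutive_loss := by
  intro arr _
  unfold Spec_longestconsecutive_loss
  rw [portA_eq, portB_eq]
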